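-- pv_equiv track=rewrite | github.com/BohuTANG/explainb-action | src/report_generator.py | format_database_results
-- ===== SOURCE A (Python) =====
-- from typing import Dict, List, Any
--
-- def format_database_results(results: List[Dict], title: str = "Database Analysis") -> str:
--     """Format database results into a readable plan format"""
--     if not results:
--         return f"-- {title}\n-- No data available"
--
--     lines = [f"-- {title}", "-- " + "="*50]
--
--     # Group results by category
--     categories = {}
--     for item in results:
--         category = item.get('category', 'unknown')
--         if category not in categories:
--             categories[category] = []
--         categories[category].append(item)
--
--     for category, items in categories.items():
--         lines.append(f"-- {category.upper()}")
--         for item in items: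
--             metric = item.get('metric', 'unknown')
--             value = item.get('value', 'unknown')
--             lines.append(f"--   {metric}: {value}")
--         lines.append("--")
--
--     return '\n'.join(lines)
-- ===== SOURCE B (Python) =====
-- def format_database_results(results, title="Database Analysis"):
--     """Format database results into a readable plan format"""
--     if not results:
--         return f"-- {title}\n-- No data available"
--
--     # First pass: distinct categories in first-appearance order
--     categories = []
--     for item in results:
--         c = item.get('category', 'unknown')
--         if c not in categories:
--             categories.append(c)
--
--     lines = [f"-- {title}", "-- " + "=" * 50]
--     # For each category, scan all results and format matching items in order
--     for c in categories:
--         lines.append(f"-- {c.upper()}")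
--         lines.extend(
--             f"--   {item.get('metric', 'unknown')}: {item.get('value', 'unknown')}"
--             for item in results
--             if item.get('category', 'unknown') == c
--         )
--         lines.append("--")
--     return '\n'.join(lines)
-- ===== Notes on version B (the rewrite author's own statement) =====
-- stated objective: alternative
-- what changed: Replaces the dict-based bucket-grouping pass with a categories-first decomposition: one pass collects distinct categories in first-appearance order, then each category's lines come from a filtering scan of the original results.
import Mathlib
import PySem

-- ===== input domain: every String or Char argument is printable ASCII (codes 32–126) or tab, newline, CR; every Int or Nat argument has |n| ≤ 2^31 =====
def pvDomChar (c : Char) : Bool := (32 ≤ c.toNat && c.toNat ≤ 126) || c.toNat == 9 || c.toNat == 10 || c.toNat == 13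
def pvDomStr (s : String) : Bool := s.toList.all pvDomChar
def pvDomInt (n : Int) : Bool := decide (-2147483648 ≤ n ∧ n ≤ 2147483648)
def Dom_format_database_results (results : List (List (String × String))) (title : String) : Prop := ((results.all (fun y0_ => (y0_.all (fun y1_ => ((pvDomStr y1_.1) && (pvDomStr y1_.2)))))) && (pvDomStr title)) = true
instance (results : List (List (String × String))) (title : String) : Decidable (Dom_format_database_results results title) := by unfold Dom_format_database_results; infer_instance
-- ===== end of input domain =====

-- B replaces A's dict bucket-grouping with a categories-first decomposition (dedup pass, then a filtering scan per category); objective: alternative.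

-- ===== PORT A =====
-- item.get(key, dflt) on a Python dict, ported as first-match lookup on the association list (exact)
def pvGet (item : List (String × String)) (k dflt : String) : String :=
  match item.find? (fun p => p.1 == k) with
  | some p => p.2
  | none => dflt

def pvCat (item : List (String × String)) : String := pvGet item "category" "unknown"

def pvLine (item : List (String × String)) : String :=
  "--   " ++ pvGet item "metric" "unknown" ++ ": " ++ pvGet item "value" "unknown"

-- A: the 'if category not in categories: categories[category] = []; categories[category].append(item)'
-- pattern is exactly d.modify category [] (· ++ [item]) (d[k] = f(d.get(k, dflt)))
def format_database_results (results : List (List (String × String))) (title : String) : String :=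
  if results = [] then "-- " ++ title ++ "\n-- No data available"
  else
    let lines : List String := ["-- " ++ title, "-- " ++ String.ofList (List.replicate 50 '=')]
    let categories := results.foldl
      (fun d it => d.modify (pvCat it) [] (· ++ [it])) (PySem.Dict.empty : PySem.Dict String (List (List (String × String))))
    let lines := categories.items.foldl (fun ls p =>
        let ls := ls ++ ["-- " ++ PySem.Str.upper p.1]
        let ls := p.2.foldl (fun ls it => ls ++ [pvLine it]) ls
        ls ++ ["--"]) lines
    PySem.Str.join "\n" lines

-- ===== PORT B =====
def format_database_results_alt (results : List (List (String × String))) (title : String) : String :=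
  if results = [] then "-- " ++ title ++ "\n-- No data available"
  else
    let cats := results.foldl
      (fun cs it => if cs.contains (pvCat it) then cs else cs ++ [pvCat it]) ([] : List String)
    let lines : List String := ["-- " ++ title, "-- " ++ String.ofList (List.replicate 50 '=')]
    let lines := cats.foldl (fun ls c =>
        let ls := ls ++ ["-- " ++ PySem.Str.upper c]
        let ls := ls ++ ((results.filter (fun it => pvCat it == c)).map pvLine)
        ls ++ ["--"]) lines
    PySem.Str.join "\n" lines

-- ===== PRECONDITION & SPEC =====
def Spec_format_database_results (results : List (List (String × String))) (title : String) (out : String) : Prop := out = format_database_results_alt results title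
instance (results : List (List (String × String))) (title : String) (out : String) : Decidable (Spec_format_database_results results title out) := by unfold Spec_format_database_results; infer_instance

-- ===== CLAIM (what is proved, stated in full; the proofs are below) =====
def Claim_equal_format_database_results : Prop := ∀ (results : List (List (String × String))) (title : String), Dom_format_database_results results title → Spec_format_database_results results title (format_database_results results title)

-- ===== LEMMAS AND PROOFS =====

-- appending one formatted line per element equals appending the mapped list
theorem pv_foldl_append_map {α β : Type} (f : α → β) :
    ∀ (xs : List α) (ls : List β), xs.foldl (fun a x => a ++ [f x]) ls = ls ++ xs.map f := by
  intro xs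
  induction xs with
  | nil => simp
  | cons x xs ih => intro ls; simp [List.foldl_cons, ih]

-- the grouping dict's bucket for c is the filter of results on category c
theorem pv_getD_group (results : List (List (String × String))) (c : String) :
    ((results.foldl (fun d it => d.modify (pvCat it) [] (· ++ [it]))
        (PySem.Dict.empty : PySem.Dict String (List (List (String × String))))).getD c [])
      = results.filter (fun it => pvCat it == c) := by
  have h := PySem.Dict.getD_foldl_modify_append
      (l := results.map (fun it => (pvCat it, it)))
      (d := (PySem.Dict.empty : PySem.Dict String (List (List (String × String))))) (c := c)
  rw [List.foldl_map] at h
  rw [h]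
  simp [List.filter_map, Function.comp_def]

-- the dict's key order is the first-appearance dedup of the categories,
-- which is exactly what B's membership-guarded append loop builds
theorem pv_keys_group (results : List (List (String × String))) :
    (results.foldl (fun d it => d.modify (pvCat it) [] (· ++ [it]))
        (PySem.Dict.empty : PySem.Dict String (List (List (String × String))))).keys
      = results.foldl (fun cs it => if cs.contains (pvCat it) then cs else cs ++ [pvCat it]) [] := by
  have hf : (fun (cs : List String) it => if cs.contains (pvCat it) then cs else cs ++ [pvCat it])
      = fun (cs : List String) it => PySem.Set.add cs (pvCat it) := by
    funext cs it
    rw [PySem.Set.add_eq_ite]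
    by_cases hm : pvCat it ∈ cs <;> simp [hm]
  rw [PySem.Dict.keys_foldl_modify_key, hf, ← PySem.Set.update_map_eq_foldl_add]
  simp [PySem.Dict.keys_empty]

-- ===== VERDICT (by name: the statement is the Claim_ definition above) =====
theorem format_database_results_spec : Claim_equal_format_database_results := by
  intro results title _
  unfold Spec_format_database_results format_database_results format_database_results_alt
  by_cases h : results = []
  · simp [h]
  · simp only [h, if_false]
    set d := results.foldl (fun d it => d.modify (pvCat it) [] (· ++ [it]))
        (PySem.Dict.empty : PySem.Dict String (List (List (String × String)))) with hd
    have hnd : d.keys.Nodup := by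
      rw [hd]
      exact PySem.Dict.nodup_keys_foldl_modify_key results pvCat [] _ _ PySem.Dict.nodup_keys_empty
    have hitems : d.items = d.keys.map (fun k => (k, d.getD k [])) :=
      PySem.Dict.items_eq_map_keys d hnd []
    congr 1
    rw [hitems, List.foldl_map, ← pv_keys_group]
    apply List.foldl_ext
    intro ls c _
    simp only [pv_foldl_append_map]
    rw [hd, pv_getD_group]
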